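-- pv_equiv track=rewrite | github.com/lesleslie/crackerjack | crackerjack/agents/type_error_specialist.py | _split_union_types
-- ===== SOURCE A (Python) =====
-- def _split_union_types(inner: str) -> list[str]:
--     """Split Union type arguments respecting nested brackets.
--
--     Args:
--         inner: The inner content of Union[...].
--
--     Returns:
--         List of type strings.
--     """
--     types = []
--     current = ""
--     depth = 0
--
--     for char in inner:
--         if char == "[":
--             depth += 1
--             current += char
--         elif char == "]":
--             depth -= 1
--             current += char
--         elif char == "," and depth == 0:
--             if current.strip():
--                 types.append(current.strip())
--             current = ""
--         else:
--             current += char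
--
--     if current.strip():
--         types.append(current.strip())
--
--     return types
-- ===== SOURCE B (Python) =====
-- def _split_union_types(inner: str) -> list[str]:
--     points = []
--     depth = 0
--     for i, ch in enumerate(inner):
--         if ch == "[":
--             depth += 1
--         elif ch == "]":
--             depth -= 1
--         elif ch == "," and depth == 0:
--             points.append(i)
--     types = []
--     prev = 0
--     for p in points + [len(inner)]:
--         seg = inner[prev:p].strip()
--         if seg:
--             types.append(seg)
--         prev = p + 1
--     return types
-- ===== Notes on version B (the rewrite author's own statement) =====
-- stated objective: alternative
-- what changed: B replaces A's character-by-character accumulation of the current segment with a two-phase plan: one depth-tracking pass collects the indices of top-level commas, then segments are produced by slicing the original string between consecutive split points, stripping, and dropping empties.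
import Mathlib
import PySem

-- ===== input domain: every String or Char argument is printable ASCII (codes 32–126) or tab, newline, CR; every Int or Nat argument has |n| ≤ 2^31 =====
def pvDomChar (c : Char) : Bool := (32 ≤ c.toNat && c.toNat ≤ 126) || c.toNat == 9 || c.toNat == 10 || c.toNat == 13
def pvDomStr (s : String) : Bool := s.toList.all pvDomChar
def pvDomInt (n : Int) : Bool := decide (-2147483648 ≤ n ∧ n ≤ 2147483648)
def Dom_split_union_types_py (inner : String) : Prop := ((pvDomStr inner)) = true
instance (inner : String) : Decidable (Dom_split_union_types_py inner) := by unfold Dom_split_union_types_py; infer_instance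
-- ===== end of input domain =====

-- B collects the indices of top-level commas in one pass and then slices the string between them;
-- same result as A's accumulate-and-flush loop (proved equal); a different decomposition, not faster.

-- ===== PORT A =====
-- the for loop of A as structural recursion over the characters, state (types, current, depth);
-- the trailing "if current.strip(): append" of A is the [] case
def splitA_loop (cs : List Char) (types : List String) (current : List Char) (depth : Int) : List String :=
  match cs with
  | [] =>
    if PySem.Chars.strip current ≠ [] then types ++ [String.ofList (PySem.Chars.strip current)] else types
  | c :: rest =>
    if c = '[' then splitA_loop rest types (current ++ [c]) (depth + 1)
    else if c = ']' then splitA_loop rest types (current ++ [c]) (depth - 1)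
    else if c = ',' ∧ depth = 0 then
      splitA_loop rest
        (if PySem.Chars.strip current ≠ [] then types ++ [String.ofList (PySem.Chars.strip current)] else types)
        [] depth
    else splitA_loop rest types (current ++ [c]) depth

def split_union_types_py (inner : String) : List String :=
  splitA_loop inner.toList [] [] 0

-- ===== PORT B =====
-- first pass of B: indices of the commas at bracket depth 0
def altPoints (cs : List Char) (i : Nat) (depth : Int) : List Nat :=
  match cs with
  | [] => []
  | c :: rest =>
    if c = '[' then altPoints rest (i + 1) (depth + 1)
    else if c = ']' then altPoints rest (i + 1) (depth - 1)
    else if c = ',' ∧ depth = 0 then i :: altPoints rest (i + 1) depth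
    else altPoints rest (i + 1) depth

-- second pass of B: slice between consecutive split points, strip, keep if non-empty
def altSegs (full : List Char) (prev : Nat) (ps : List Nat) (types : List String) : List String :=
  match ps with
  | [] => types
  | p :: rest =>
    let seg := PySem.Chars.strip (PySem.List.slice full (some (prev : Int)) (some (p : Int)))
    altSegs full (p + 1) rest (if seg ≠ [] then types ++ [String.ofList seg] else types)

def split_union_types_py_alt (inner : String) : List String :=
  altSegs inner.toList 0 (altPoints inner.toList 0 0 ++ [inner.toList.length]) []

-- ===== PRECONDITION & SPEC =====
def Spec_split_union_types_py (inner : String) (out : List String) : Prop := out = split_union_types_py_alt inner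
instance (inner : String) (out : List String) : Decidable (Spec_split_union_types_py inner out) := by unfold Spec_split_union_types_py; infer_instance

-- ===== CLAIM (what is proved, stated in full; the proofs are below) =====
def Claim_equal_split_union_types_py : Prop := ∀ (inner : String), Dom_split_union_types_py inner → Spec_split_union_types_py inner (split_union_types_py inner)

-- ===== LEMMAS AND PROOFS =====

-- canonical middle form: split at top-level commas, then strip and drop empties
def topSplit : List Char → Int → List (List Char)
  | [], _ => [[]]
  | c :: rest, d =>
    if c = ',' ∧ d = 0 then [] :: topSplit rest d
    else
      let d' := if c = '[' then d + 1 else if c = ']' then d - 1 else d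
      match topSplit rest d' with
      | [] => [[c]]
      | s :: ss => (c :: s) :: ss

def mapHead (f : List Char → List Char) : List (List Char) → List (List Char)
  | [] => []
  | s :: ss => f s :: ss

def clean : List (List Char) → List String
  | [] => []
  | s :: ss =>
    if PySem.Chars.strip s ≠ [] then String.ofList (PySem.Chars.strip s) :: clean ss else clean ss

theorem topSplit_ne_nil (cs : List Char) (d : Int) : topSplit cs d ≠ [] := by
  cases cs with
  | nil => simp [topSplit]
  | cons c rest =>
    simp only [topSplit]
    split_ifs <;> (try simp) <;> (cases h : topSplit rest _ <;> simp)

theorem topSplit_cons_of_else (c : Char) (rest : List Char) (d : Int)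
    (h : ¬ (c = ',' ∧ d = 0)) :
    topSplit (c :: rest) d =
      mapHead (fun s => c :: s)
        (topSplit rest (if c = '[' then d + 1 else if c = ']' then d - 1 else d)) := by
  simp only [topSplit, if_neg h]
  cases h' : topSplit rest (if c = '[' then d + 1 else if c = ']' then d - 1 else d) with
  | nil => exact absurd h' (topSplit_ne_nil _ _)
  | cons s ss => simp [mapHead]

theorem topSplit_comma (rest : List Char) : topSplit (',' :: rest) 0 = [] :: topSplit rest 0 := by
  simp [topSplit]

theorem topSplit_lb (rest : List Char) (d : Int) :
    topSplit ('[' :: rest) d = mapHead (fun s => '[' :: s) (topSplit rest (d + 1)) := by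
  rw [topSplit_cons_of_else _ _ _ (by simp)]; simp

theorem topSplit_rb (rest : List Char) (d : Int) :
    topSplit (']' :: rest) d = mapHead (fun s => ']' :: s) (topSplit rest (d - 1)) := by
  rw [topSplit_cons_of_else _ _ _ (by simp)]; simp

theorem topSplit_other (c : Char) (rest : List Char) (d : Int)
    (h1 : ¬ c = '[') (h2 : ¬ c = ']') (h : ¬ (c = ',' ∧ d = 0)) :
    topSplit (c :: rest) d = mapHead (fun s => c :: s) (topSplit rest d) := by
  rw [topSplit_cons_of_else _ _ _ h]; simp [h1, h2]

theorem mapHead_cons_collapse (x : List Char) (c : Char) (T : List (List Char)) :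
    mapHead (fun s => x ++ s) (mapHead (fun s => c :: s) T)
      = mapHead (fun s => (x ++ [c]) ++ s) T := by
  cases T <;> simp [mapHead]

theorem mapHead_nil_append (T : List (List Char)) :
    mapHead (fun s => ([] : List Char) ++ s) T = T := by
  cases T <;> simp [mapHead]

theorem clean_cons (s : List Char) (ss : List (List Char)) :
    clean (s :: ss)
      = if PySem.Chars.strip s ≠ [] then String.ofList (PySem.Chars.strip s) :: clean ss
        else clean ss := rfl

-- step equations for A's loop
theorem splitA_lb (rest : List Char) (t : List String) (cur : List Char) (d : Int) :
    splitA_loop ('[' :: rest) t cur d = splitA_loop rest t (cur ++ ['[']) (d + 1) := by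
  simp [splitA_loop]

theorem splitA_rb (rest : List Char) (t : List String) (cur : List Char) (d : Int) :
    splitA_loop (']' :: rest) t cur d = splitA_loop rest t (cur ++ [']']) (d - 1) := by
  simp [splitA_loop]

theorem splitA_comma (rest : List Char) (t : List String) (cur : List Char) :
    splitA_loop (',' :: rest) t cur 0
      = splitA_loop rest
          (if PySem.Chars.strip cur ≠ [] then t ++ [String.ofList (PySem.Chars.strip cur)] else t)
          [] 0 := by
  simp [splitA_loop]

theorem splitA_other (c : Char) (rest : List Char) (t : List String) (cur : List Char) (d : Int)
    (h1 : ¬ c = '[') (h2 : ¬ c = ']') (h : ¬ (c = ',' ∧ d = 0)) :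
    splitA_loop (c :: rest) t cur d = splitA_loop rest t (cur ++ [c]) d := by
  simp only [splitA_loop]; rw [if_neg h1, if_neg h2, if_neg h]

theorem splitA_loop_eq (cs : List Char) :
    ∀ (types : List String) (current : List Char) (depth : Int),
    splitA_loop cs types current depth
      = types ++ clean (mapHead (fun s => current ++ s) (topSplit cs depth)) := by
  induction cs with
  | nil =>
    intro types current depth
    simp only [splitA_loop, topSplit, mapHead, clean_cons, clean]
    split_ifs <;> simp_all
  | cons c rest ih =>
    intro types current depth
    by_cases hcd : c = ',' ∧ depth = 0
    · obtain ⟨hc, hd⟩ := hcd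
      subst hc hd
      rw [splitA_comma, ih, mapHead_nil_append, topSplit_comma]
      simp only [mapHead, List.append_nil, clean_cons]
      split_ifs <;> simp_all
    · by_cases h1 : c = '['
      · subst h1
        rw [splitA_lb, ih, topSplit_lb, mapHead_cons_collapse]
      · by_cases h2 : c = ']'
        · subst h2
          rw [splitA_rb, ih, topSplit_rb, mapHead_cons_collapse]
        · rw [splitA_other c rest types current depth h1 h2 hcd, ih,
              topSplit_other c rest depth h1 h2 hcd, mapHead_cons_collapse]

theorem split_eq_clean_topSplit (inner : String) :
    split_union_types_py inner = clean (topSplit inner.toList 0) := by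
  unfold split_union_types_py
  rw [splitA_loop_eq, mapHead_nil_append]
  simp

-- B-side: the raw segments cut at the collected points
def rawSegs (full : List Char) (prev : Nat) : List Nat → List (List Char)
  | [] => []
  | p :: rest =>
    PySem.List.slice full (some (prev : Int)) (some (p : Int)) :: rawSegs full (p + 1) rest

theorem altSegs_eq (full : List Char) :
    ∀ (ps : List Nat) (prev : Nat) (types : List String),
    altSegs full prev ps types = types ++ clean (rawSegs full prev ps) := by
  intro ps
  induction ps with
  | nil => intro prev types; simp [altSegs, rawSegs, clean]
  | cons p rest ih =>
    intro prev types
    simp only [altSegs, rawSegs, clean_cons]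
    rw [ih]
    split_ifs <;> simp

theorem slice_nat (full : List Char) (a b : Nat) :
    PySem.List.slice full (some (a : Int)) (some (b : Int)) = (full.drop a).take (b - a) := by
  rw [PySem.List.slice_toNat full (Int.natCast_nonneg a) (Int.natCast_nonneg b)]
  simp

theorem altPoints_comma (rest : List Char) (i : Nat) :
    altPoints (',' :: rest) i 0 = i :: altPoints rest (i + 1) 0 := by
  simp [altPoints]

theorem altPoints_lb (rest : List Char) (i : Nat) (d : Int) :
    altPoints ('[' :: rest) i d = altPoints rest (i + 1) (d + 1) := by
  simp [altPoints]

theorem altPoints_rb (rest : List Char) (i : Nat) (d : Int) :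
    altPoints (']' :: rest) i d = altPoints rest (i + 1) (d - 1) := by
  simp [altPoints]

theorem altPoints_other (c : Char) (rest : List Char) (i : Nat) (d : Int)
    (h1 : ¬ c = '[') (h2 : ¬ c = ']') (h : ¬ (c = ',' ∧ d = 0)) :
    altPoints (c :: rest) i d = altPoints rest (i + 1) d := by
  simp only [altPoints]; rw [if_neg h1, if_neg h2, if_neg h]

theorem altPoints_ge (cs : List Char) :
    ∀ (i : Nat) (d : Int) (p : Nat), p ∈ altPoints cs i d → i ≤ p := by
  induction cs with
  | nil => intro i d p h; simp [altPoints] at h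
  | cons c rest ih =>
    intro i d p h
    simp only [altPoints] at h
    split_ifs at h
    · exact Nat.le_of_succ_le (ih (i + 1) _ p h)
    · exact Nat.le_of_succ_le (ih (i + 1) _ p h)
    · rcases List.mem_cons.mp h with h | h
      · omega
      · exact Nat.le_of_succ_le (ih (i + 1) _ p h)
    · exact Nat.le_of_succ_le (ih (i + 1) _ p h)

theorem slice_cons (full : List Char) (i q : Nat) (c : Char) (rest : List Char)
    (hdrop : full.drop i = c :: rest) (hq : i + 1 ≤ q) :
    PySem.List.slice full (some (i : Int)) (some (q : Int))
      = c :: PySem.List.slice full (some ((i + 1 : Nat) : Int)) (some (q : Int)) := by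
  have hrest : full.drop (i + 1) = rest := by
    rw [← List.tail_drop, hdrop]; rfl
  rw [slice_nat, slice_nat, hdrop, hrest]
  have h1 : q - i = (q - (i + 1)) + 1 := by omega
  rw [h1, List.take_succ_cons]

theorem rawSegs_shift (full : List Char) (i : Nat) (c : Char) (rest : List Char)
    (hdrop : full.drop i = c :: rest) (ps : List Nat) (hge : ∀ p ∈ ps, i + 1 ≤ p) :
    rawSegs full i ps = mapHead (fun s => c :: s) (rawSegs full (i + 1) ps) := by
  cases ps with
  | nil => simp [rawSegs, mapHead]
  | cons q qs =>
    simp only [rawSegs, mapHead]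
    rw [slice_cons full i q c rest hdrop (hge q (List.mem_cons_self))]

theorem rawSegs_points_eq (full : List Char) (cs : List Char) :
    ∀ (i : Nat) (d : Int), full.drop i = cs →
    rawSegs full i (altPoints cs i d ++ [full.length]) = topSplit cs d := by
  induction cs with
  | nil =>
    intro i d hdrop
    simp only [altPoints, List.nil_append, rawSegs, topSplit]
    rw [slice_nat, hdrop]
    simp
  | cons c rest ih =>
    intro i d hdrop
    have hrest : full.drop (i + 1) = rest := by
      rw [← List.tail_drop, hdrop]; rfl
    by_cases hcd : c = ',' ∧ d = 0
    · obtain ⟨hc, hd⟩ := hcd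
      subst hc hd
      rw [altPoints_comma, topSplit_comma]
      simp only [List.cons_append, rawSegs]
      rw [slice_nat]
      simp only [Nat.sub_self, List.take_zero]
      rw [ih (i + 1) 0 hrest]
    · have hge : ∀ p ∈ altPoints rest (i + 1)
            (if c = '[' then d + 1 else if c = ']' then d - 1 else d) ++ [full.length],
          i + 1 ≤ p := by
        intro p hp
        rcases List.mem_append.mp hp with hp | hp
        · exact altPoints_ge rest (i + 1) _ p hp
        · have hlen : i + 1 ≤ full.length := by
            have h := congrArg List.length hdrop
            simp at h; omega
          simp at hp; omega
      by_cases h1 : c = '['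
      · subst h1
        rw [altPoints_lb, topSplit_lb, ← ih (i + 1) (d + 1) hrest]
        exact rawSegs_shift full i '[' rest hdrop _ (by simpa using hge)
      · by_cases h2 : c = ']'
        · subst h2
          rw [altPoints_rb, topSplit_rb, ← ih (i + 1) (d - 1) hrest]
          exact rawSegs_shift full i ']' rest hdrop _ (by simpa [h1] using hge)
        · rw [altPoints_other c rest i d h1 h2 hcd, topSplit_other c rest d h1 h2 hcd,
              ← ih (i + 1) d hrest]
          exact rawSegs_shift full i c rest hdrop _ (by simpa [h1, h2] using hge)

theorem alt_eq_clean_topSplit (inner : String) :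
    split_union_types_py_alt inner = clean (topSplit inner.toList 0) := by
  unfold split_union_types_py_alt
  rw [altSegs_eq, rawSegs_points_eq inner.toList inner.toList 0 0 (by simp)]
  simp

-- ===== VERDICT (by name: the statement is the Claim_ definition above) =====
theorem split_union_types_py_spec : Claim_equal_split_union_types_py := by
  intro inner _
  unfold Spec_split_union_types_py
  rw [split_eq_clean_topSplit, alt_eq_clean_topSplit]
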